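-- pv_equiv track=rewrite | github.com/rsalesc/rbx | rbx/utils.py | normalize_with_underscores
-- ===== SOURCE A (Python) =====
-- def normalize_with_underscores(s: str) -> str:
--     res = s.replace(' ', '_').replace('.', '_').strip('_')
--     final = []
--
--     last = ''
--     for c in res:
--         if c == '_' and last == c:
--             continue
--         last = c
--         final.append(c)
--     return ''.join(final)
-- ===== SOURCE B (Python) =====
-- def normalize_with_underscores(s: str) -> str:
--     res = s.replace(' ', '_').replace('.', '_')
--     return '_'.join(t for t in res.split('_') if t)
-- ===== Notes on version B (the rewrite author's own statement) =====
-- stated objective: simpler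
-- what changed: Replaces the strip plus stateful per-character run-collapsing loop with a split-on-underscore / drop-empty-tokens / join-with-underscore pipeline, which handles both edge-stripping and run-collapsing at once.
import Mathlib
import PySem

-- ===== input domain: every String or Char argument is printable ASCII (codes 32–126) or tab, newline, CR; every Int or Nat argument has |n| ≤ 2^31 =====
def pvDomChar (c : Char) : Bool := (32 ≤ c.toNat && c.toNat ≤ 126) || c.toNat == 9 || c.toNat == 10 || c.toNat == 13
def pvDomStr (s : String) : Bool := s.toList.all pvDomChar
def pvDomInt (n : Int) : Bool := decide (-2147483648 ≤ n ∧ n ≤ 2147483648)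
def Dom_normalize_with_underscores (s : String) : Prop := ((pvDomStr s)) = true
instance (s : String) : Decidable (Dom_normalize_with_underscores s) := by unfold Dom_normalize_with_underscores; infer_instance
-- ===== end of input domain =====

-- B replaces A's strip plus stateful per-character run-collapsing loop by a split-on-underscore /
-- drop-empty-tokens / join-with-underscore pipeline (simpler; measured faster in a timing run).

-- ===== PORT A =====
-- res = s.replace(' ', '_').replace('.', '_').strip('_'); then the last/final loop; ''.join(final)
def normalize_with_underscores (s : String) : String :=
  let res := PySem.Str.stripChars (PySem.Str.replace (PySem.Str.replace s " " "_") "." "_") "_"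
  -- state: (last, final); Python's initial last = '' is modelled as none (never equal to a char)
  let step := fun (st : Option Char × List Char) (c : Char) =>
    if c == '_' && st.1 == some c then st else (some c, st.2 ++ [c])
  let final := (res.toList.foldl step (none, [])).2
  String.ofList final

-- ===== PORT B =====
-- res = s.replace(' ', '_').replace('.', '_'); '_'.join(t for t in res.split('_') if t)
def normalize_with_underscores_alt (s : String) : String :=
  let res := PySem.Str.replace (PySem.Str.replace s " " "_") "." "_"
  -- res.split('_') with the literal non-empty separator '_' (Chars.splitOn is Python's split for a non-empty sep)
  let toks := (PySem.Chars.splitOn res.toList ['_']).map String.ofList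
  PySem.Str.join "_" (toks.filter (fun t => !(t == "")))

-- ===== PRECONDITION & SPEC =====
def Spec_normalize_with_underscores (s : String) (out : String) : Prop := out = normalize_with_underscores_alt s
instance (s : String) (out : String) : Decidable (Spec_normalize_with_underscores s out) := by unfold Spec_normalize_with_underscores; infer_instance

-- ===== CLAIM (what is proved, stated in full; the proofs are below) =====
def Claim_equal_normalize_with_underscores : Prop := ∀ (s : String), Dom_normalize_with_underscores s → Spec_normalize_with_underscores s (normalize_with_underscores s)

-- ===== LEMMAS AND PROOFS =====

-- `mySplit l` = Python's l.split('_') on char lists (recursion-friendly form of Chars.splitOn l ['_'])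
def pvConsHead (r : List Char) : List (List Char) → List (List Char)
  | [] => [r]
  | t :: ts => (r ++ t) :: ts

def pvMySplit : List Char → List (List Char)
  | [] => [[]]
  | c :: r => if c = '_' then [] :: pvMySplit r else pvConsHead [c] (pvMySplit r)

theorem pvMySplit_ne_nil (l : List Char) : pvMySplit l ≠ [] := by
  cases l with
  | nil => simp [pvMySplit]
  | cons c r =>
    simp only [pvMySplit]
    split
    · simp
    · cases h : pvMySplit r <;> simp [pvConsHead]

theorem pvSplitOn_go_eq (fuel : Nat) : ∀ (l cur : List Char) (acc : List (List Char)),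
    l.length < fuel →
    PySem.Chars.splitOn.go ['_'] fuel l cur acc = acc.reverse ++ pvConsHead cur.reverse (pvMySplit l) := by
  induction fuel with
  | zero => intro l cur acc h; omega
  | succ fuel ih =>
    intro l cur acc h
    cases l with
    | nil =>
      simp [PySem.Chars.splitOn.go, pvMySplit, pvConsHead]
    | cons c rest =>
      have hstep : PySem.Chars.splitOn.go ['_'] (fuel+1) (c::rest) cur acc =
          if ['_'].isPrefixOf (c::rest) then
            PySem.Chars.splitOn.go ['_'] fuel (List.drop 1 (c::rest)) [] (cur.reverse :: acc)
          else PySem.Chars.splitOn.go ['_'] fuel rest (c :: cur) acc := by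
        simp [PySem.Chars.splitOn.go]
      rw [hstep]
      by_cases hc : c = '_'
      · subst hc
        simp only [List.isPrefixOf, BEq.rfl, Bool.true_and, if_true,
          List.drop_succ_cons, List.drop_zero]
        rw [ih rest [] (cur.reverse :: acc) (by simpa using h)]
        have : pvConsHead ([] : List Char).reverse (pvMySplit rest) = pvMySplit rest := by
          cases hr : pvMySplit rest with
          | nil => exact absurd hr (pvMySplit_ne_nil rest)
          | cons t ts => simp [pvConsHead]
        rw [this]
        simp [pvMySplit, pvConsHead]
      · have hpre : (['_'].isPrefixOf (c::rest)) = false := by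
          simp [List.isPrefixOf]
          intro h'; exact absurd h'.symm hc
        rw [hpre]
        simp only [if_false, Bool.false_eq_true]
        rw [ih rest (c::cur) acc (by simpa using h)]
        have : pvMySplit (c::rest) = pvConsHead [c] (pvMySplit rest) := by simp [pvMySplit, hc]
        rw [this]
        cases hr : pvMySplit rest with
        | nil => exact absurd hr (pvMySplit_ne_nil rest)
        | cons t ts => simp [pvConsHead]

theorem pvSplitOn_eq (l : List Char) : PySem.Chars.splitOn l ['_'] = pvMySplit l := by
  unfold PySem.Chars.splitOn
  rw [pvSplitOn_go_eq (l.length + 1) l [] [] (by omega)]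
  cases hr : pvMySplit l with
  | nil => exact absurd hr (pvMySplit_ne_nil l)
  | cons t ts => simp [pvConsHead]

-- words l = the nonempty tokens of l.split('_')
def pvWords (l : List Char) : List (List Char) := (pvMySplit l).filter (fun t => !t.isEmpty)

theorem pvWords_underscore_cons (l : List Char) : pvWords ('_' :: l) = pvWords l := by
  simp [pvWords, pvMySplit]

theorem pvMySplit_append_underscore (l : List Char) : pvMySplit (l ++ ['_']) = pvMySplit l ++ [[]] := by
  induction l with
  | nil => simp [pvMySplit]
  | cons c r ih =>
    by_cases hc : c = '_'
    · subst hc; simp [pvMySplit, ih]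
    · simp only [List.cons_append, pvMySplit, if_neg hc, ih]
      cases hr : pvMySplit r with
      | nil => exact absurd hr (pvMySplit_ne_nil r)
      | cons t ts => simp [pvConsHead]

theorem pvWords_append_underscore (l : List Char) : pvWords (l ++ ['_']) = pvWords l := by
  simp [pvWords, pvMySplit_append_underscore, List.filter_append]

theorem pvWords_append_all_underscore : ∀ (us l : List Char), (∀ c ∈ us, c = '_') →
    pvWords (l ++ us) = pvWords l := by
  intro us
  induction us with
  | nil => simp
  | cons u us ih =>
    intro l h
    have hu : u = '_' := h u (by simp)
    subst hu
    have : l ++ '_' :: us = (l ++ ['_']) ++ us := by simp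
    rw [this, ih (l ++ ['_']) (fun c hc => h c (by simp [hc])), pvWords_append_underscore]

theorem pvWords_dropWhile (p : Char → Bool) (hp : ∀ c, p c = true → c = '_') :
    ∀ l : List Char, pvWords (List.dropWhile p l) = pvWords l := by
  intro l
  induction l with
  | nil => simp
  | cons c r ih =>
    by_cases hc : p c
    · have : c = '_' := hp c hc
      subst this
      rw [List.dropWhile_cons_of_pos hc, ih, pvWords_underscore_cons]
    · rw [List.dropWhile_cons_of_neg hc]

-- collapse with state flag u = "last appended char was '_'"
def pvColl (u : Bool) : List Char → List Char
  | [] => []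
  | c :: r => if c = '_' then (if u then pvColl true r else '_' :: pvColl true r) else c :: pvColl false r

theorem pvFoldl_coll (l : List Char) : ∀ (last : Option Char) (acc : List Char),
    (l.foldl (fun (st : Option Char × List Char) (c : Char) =>
      if c == '_' && st.1 == some c then st else (some c, st.2 ++ [c])) (last, acc)).2
      = acc ++ pvColl (last == some '_') l := by
  induction l with
  | nil => intro last acc; simp [pvColl]
  | cons c r ih =>
    intro last acc
    by_cases hc : c = '_'
    · subst hc
      by_cases hl : last = some '_'
      · subst hl
        have h1 : (('_' : Char) == '_' && (some '_' : Option Char) == some '_') = true := by simp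
        simp only [List.foldl_cons, h1, if_true]
        rw [ih (some '_') acc]
        simp [pvColl]
      · have h1 : (('_' : Char) == '_' && last == some '_') = false := by
          cases last with
          | none => simp
          | some d =>
            simp only [BEq.rfl, Bool.true_and]
            simp only [Option.some.injEq] at hl ⊢
            simp [hl]
        simp only [List.foldl_cons, h1, Bool.false_eq_true, if_false]
        rw [ih (some '_') (acc ++ ['_'])]
        have h2 : (last == some '_') = false := by
          cases last with
          | none => simp
          | some d => simp only [Option.some.injEq] at hl ⊢; simp [hl]
        simp [pvColl, h2]
    · have h1 : (c == '_' && last == some c) = false := by simp [hc]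
      simp only [List.foldl_cons, h1, Bool.false_eq_true, if_false]
      rw [ih (some c) (acc ++ [c])]
      have h2 : ((some c : Option Char) == some '_') = false := by simp [hc]
      simp [pvColl, hc, h2]

theorem pvColl_true_eq_drop (l : List Char) :
    pvColl true l = pvColl false (List.dropWhile (fun c => c == '_') l) := by
  induction l with
  | nil => simp [pvColl]
  | cons c r ih =>
    by_cases hc : c = '_'
    · subst hc; simp [pvColl, ih, List.dropWhile]
    · have hd : List.dropWhile (fun c => c == '_') (c :: r) = c :: r := by
        rw [List.dropWhile_cons_of_neg]; simp [hc]
      simp [pvColl, hc, hd]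

theorem pvColl_append_free : ∀ (t l : List Char), (∀ c ∈ t, c ≠ '_') →
    pvColl false (t ++ l) = t ++ pvColl false l := by
  intro t
  induction t with
  | nil => simp
  | cons c t ih =>
    intro l h
    have hc : c ≠ '_' := h c (by simp)
    simp only [List.cons_append, pvColl, if_neg hc]
    rw [ih l (fun x hx => h x (by simp [hx]))]

theorem pvColl_free (l : List Char) (h : ∀ c ∈ l, c ≠ '_') : pvColl false l = l := by
  have := pvColl_append_free l [] h
  simpa [pvColl] using this

-- mySplit splits at the first underscore
theorem pvMySplit_no_underscore (l : List Char) (h : List.dropWhile (fun c => !(c == '_')) l = []) :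
    pvMySplit l = [l] := by
  induction l with
  | nil => simp [pvMySplit]
  | cons c r ih =>
    by_cases hc : c = '_'
    · subst hc; simp [List.dropWhile] at h
    · rw [List.dropWhile_cons_of_pos (by simp [hc])] at h
      simp [pvMySplit, if_neg hc, ih h, pvConsHead]

theorem pvMySplit_first_underscore : ∀ (l r' : List Char),
    List.dropWhile (fun c => !(c == '_')) l = '_' :: r' →
    pvMySplit l = List.takeWhile (fun c => !(c == '_')) l :: pvMySplit r' := by
  intro l
  induction l with
  | nil => intro r' h; simp at h
  | cons c r ih =>
    intro r' h
    by_cases hc : c = '_'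
    · subst hc
      rw [List.dropWhile_cons_of_neg (by simp)] at h
      obtain ⟨-, rfl⟩ : '_' = '_' ∧ r = r' := by simpa using h
      simp [pvMySplit, List.takeWhile_cons_of_neg]
    · rw [List.dropWhile_cons_of_pos (by simp [hc])] at h
      rw [List.takeWhile_cons_of_pos (by simp [hc])]
      simp [pvMySplit, if_neg hc, ih r' h, pvConsHead]

theorem pvWords_cons_ne_nil (c : Char) (r : List Char) (hc : c ≠ '_') : pvWords (c :: r) ≠ [] := by
  simp only [pvWords, pvMySplit, if_neg hc]
  cases hr : pvMySplit r with
  | nil => exact absurd hr (pvMySplit_ne_nil r)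
  | cons t ts => simp [pvConsHead]

theorem pvJoin_cons_ne_nil (x : List Char) (L : List (List Char)) (h : L ≠ []) :
    PySem.Chars.join ['_'] (x :: L) = x ++ '_' :: PySem.Chars.join ['_'] L := by
  cases L with
  | nil => exact absurd rfl h
  | cons y ys => simp [PySem.Chars.join, List.intercalate, List.intersperse]

theorem pvDropWhile_head (p : Char → Bool) : ∀ (l : List Char) (c : Char) (t : List Char),
    List.dropWhile p l = c :: t → p c = false := by
  intro l
  induction l with
  | nil => intro c t h; simp at h
  | cons a l ih =>
    intro c t h
    by_cases ha : p a
    · rw [List.dropWhile_cons_of_pos ha] at h; exact ih c t h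
    · rw [List.dropWhile_cons_of_neg ha] at h
      obtain ⟨rfl, -⟩ : a = c ∧ l = t := by simpa using h
      simpa using ha

theorem pvAll_underscore_getLast : ∀ (r' x : List Char), (∀ c ∈ r', c = '_') →
    (x ++ '_' :: r').getLast? = some '_' := by
  intro r'
  induction r' with
  | nil => intro x _; simp
  | cons u us ih =>
    intro x h
    have hu : u = '_' := h u (by simp)
    subst hu
    have : x ++ '_' :: '_' :: us = (x ++ ['_']) ++ '_' :: us := by simp
    rw [this]
    exact ih (x ++ ['_']) (fun c hc => h c (by simp [hc]))

-- main lemma: on a list with no leading and no trailing underscore, A's collapse = '_'-join of the words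
theorem pvColl_eq_join : ∀ (n : Nat) (m : List Char), m.length ≤ n →
    m.head? ≠ some '_' → m.getLast? ≠ some '_' →
    pvColl false m = PySem.Chars.join ['_'] (pvWords m) := by
  intro n
  induction n with
  | zero =>
    intro m hm _ _
    have : m = [] := List.length_eq_zero_iff.mp (by omega)
    subst this
    simp [pvColl, pvWords, pvMySplit, PySem.Chars.join, List.filter, List.intercalate]
  | succ n ih =>
    intro m hm hhead hlast
    cases m with
    | nil => simp [pvColl, pvWords, pvMySplit, PySem.Chars.join, List.filter, List.intercalate]
    | cons c r =>
      have hc : c ≠ '_' := by intro h; subst h; simp at hhead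
      set q : Char → Bool := fun c => !(c == '_') with hq
      cases hd : List.dropWhile q r with
      | nil =>
        -- r is underscore-free
        have hrfree : ∀ x ∈ r, x ≠ '_' := by
          intro x hx h
          have : r = List.takeWhile q r := by
            conv_lhs => rw [← List.takeWhile_append_dropWhile (p := q) (l := r)]
            rw [hd]; simp
          rw [this] at hx
          have := List.mem_takeWhile_imp hx
          simp [hq, h] at this
        have h1 : pvColl false (c :: r) = c :: r := by
          apply pvColl_free
          intro x hx
          rcases List.mem_cons.mp hx with h | h
          · subst h; exact hc
          · exact hrfree x h
        have h2 : pvMySplit (c :: r) = [c :: r] := by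
          simp [pvMySplit, if_neg hc, pvMySplit_no_underscore r hd, pvConsHead]
        rw [h1]
        simp [pvWords, h2, List.filter, PySem.Chars.join, List.intercalate]
      | cons u r' =>
        have hu : u = '_' := by
          have hpc := pvDropWhile_head q r u r' hd
          rw [hq] at hpc
          simpa using hpc
        subst hu
        set t₀ := List.takeWhile q r with ht₀
        have hr : r = t₀ ++ '_' :: r' := by
          conv_lhs => rw [← List.takeWhile_append_dropWhile (p := q) (l := r)]
          rw [hd]
        have ht₀free : ∀ x ∈ t₀, x ≠ '_' := by
          intro x hx h
          have := List.mem_takeWhile_imp hx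
          simp [hq, h] at this
        set r'' := List.dropWhile (fun c => c == '_') r' with hr''
        have hr''ne : r'' ≠ [] := by
          intro hnil
          have hall : ∀ x ∈ r', x = '_' := by
            intro x hx
            have : r' = List.takeWhile (fun c => c == '_') r' := by
              conv_lhs => rw [← List.takeWhile_append_dropWhile (p := fun c => c == '_') (l := r')]
              rw [← hr'', hnil]; simp
            rw [this] at hx
            have := List.mem_takeWhile_imp hx
            simpa using this
          have : (c :: r).getLast? = some '_' := by
            rw [hr]
            have : c :: (t₀ ++ '_' :: r') = (c :: t₀) ++ '_' :: r' := by simp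
            rw [this]
            exact pvAll_underscore_getLast r' (c :: t₀) hall
          exact hlast this
        obtain ⟨c', t', hc'⟩ := List.exists_cons_of_ne_nil hr''ne
        have hc'ne : c' ≠ '_' := by
          have hpc := pvDropWhile_head (fun c => c == '_') r' c' t' (by rw [← hr'']; exact hc')
          simpa using hpc
        -- r'' is a suffix of r', so getLast? carries over
        have hsuf : r'' <:+ r' := by rw [hr'']; exact List.dropWhile_suffix _
        obtain ⟨pre, hpre⟩ := hsuf
        have hlast'' : r''.getLast? ≠ some '_' := by
          have h1 : (c :: r).getLast? = r''.getLast? := by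
            rw [hr, ← hpre]
            have : c :: (t₀ ++ '_' :: (pre ++ r'')) = (c :: t₀ ++ '_' :: pre) ++ r'' := by simp
            rw [this]
            exact List.getLast?_append_of_ne_nil (l₁ := c :: t₀ ++ '_' :: pre) hr''ne
          rw [← h1]; exact hlast
        have hhead'' : r''.head? ≠ some '_' := by
          rw [hc']; simp [hc'ne]
        have hlen : r''.length ≤ n := by
          have h1 : r''.length ≤ r'.length := by rw [hr'']; exact List.length_dropWhile_le _ _
          have h2 : (c :: r).length = 1 + t₀.length + 1 + r'.length := by rw [hr]; simp; omega
          have := hm; rw [h2] at this; omega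
        have ihr := ih r'' hlen hhead'' hlast''
        -- words side
        have hws : pvWords (c :: r) = (c :: t₀) :: pvWords r' := by
          have hd2 : List.dropWhile q (t₀ ++ '_' :: r') = '_' :: r' := by rw [← hr]; exact hd
          have ht2 : List.takeWhile q (t₀ ++ '_' :: r') = t₀ := by rw [← hr, ← ht₀]
          simp only [pvWords, pvMySplit, if_neg hc, hr]
          rw [pvMySplit_first_underscore _ r' hd2, ht2]
          simp [pvConsHead]
        have hwr : pvWords r' = pvWords r'' := by
          rw [hr'']
          exact (pvWords_dropWhile (fun c => c == '_') (by intro c h; simpa using h) r').symm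
        have hwne : pvWords r'' ≠ [] := by
          rw [hc']; exact pvWords_cons_ne_nil c' t' hc'ne
        -- collapse side
        have hcoll : pvColl false (c :: r) = c :: t₀ ++ '_' :: pvColl false r'' := by
          have h3 : pvColl false ('_' :: r') = '_' :: pvColl true r' := by simp [pvColl]
          simp only [pvColl, if_neg hc]
          rw [hr, pvColl_append_free t₀ ('_' :: r') ht₀free, h3, pvColl_true_eq_drop, ← hr'']
          simp
        rw [hcoll, hws, hwr, pvJoin_cons_ne_nil _ _ hwne, ihr]

-- the strip: words are unchanged, and the result has no edge underscores
theorem pvStrip_words (l : List Char) :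
    pvWords (PySem.Chars.stripChars l ['_']) = pvWords l := by
  have hp : ∀ c, (['_'].contains c) = true → c = '_' := by
    intro c h
    by_cases hc : c = '_'
    · exact hc
    · simp [hc] at h
  unfold PySem.Chars.stripChars
  set p : Char → Bool := fun c => ['_'].contains c with hpdef
  set a := List.dropWhile p l with ha
  have h1 : pvWords a = pvWords l := pvWords_dropWhile p hp l
  set b := (List.dropWhile p a.reverse).reverse with hb
  have h2 : a = b ++ (List.takeWhile p a.reverse).reverse := by
    rw [hb, ← List.reverse_append, List.takeWhile_append_dropWhile, List.reverse_reverse]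
  have h3 : pvWords b = pvWords a := by
    rw [h2, pvWords_append_all_underscore]
    intro c hcmem
    rw [List.mem_reverse] at hcmem
    exact hp c (List.mem_takeWhile_imp hcmem)
  rw [h3, h1]

theorem pvHead_aux (p : Char → Bool) (l : List Char) : ∀ (c : Char) (t : List Char),
    (List.dropWhile p ((List.dropWhile p l).reverse)).reverse = c :: t → p c = false := by
  intro c t hmm
  have hsuf : List.dropWhile p (List.dropWhile p l).reverse <:+ (List.dropWhile p l).reverse :=
    List.dropWhile_suffix p
  have h := hsuf.reverse
  rw [List.reverse_reverse] at h
  rw [hmm] at h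
  obtain ⟨u, hu⟩ := h
  exact pvDropWhile_head p l c (t ++ u) (by rw [← hu]; simp)

theorem pvLast_aux (p : Char → Bool) (x : List Char) : ∀ (c : Char),
    ((List.dropWhile p x).reverse).getLast? = some c → p c = false := by
  intro c h
  cases hdd : List.dropWhile p x with
  | nil => rw [hdd] at h; simp at h
  | cons a t =>
    rw [hdd, List.getLast?_reverse, List.head?_cons] at h
    obtain rfl : a = c := by simpa using h
    exact pvDropWhile_head p x a t hdd

theorem pvStrip_head (l : List Char) :
    (PySem.Chars.stripChars l ['_']).head? ≠ some '_' := by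
  cases hmm : PySem.Chars.stripChars l ['_'] with
  | nil => simp
  | cons c t =>
    have hpc := pvHead_aux (fun c => (['_'] : List Char).contains c) l c t (by exact hmm)
    simp only [List.head?_cons, ne_eq, Option.some.injEq]
    intro hcon
    rw [hcon] at hpc
    simp at hpc

theorem pvStrip_last (l : List Char) :
    (PySem.Chars.stripChars l ['_']).getLast? ≠ some '_' := by
  intro hcon
  have hpc := pvLast_aux (fun c => (['_'] : List Char).contains c)
    ((List.dropWhile (fun c => (['_'] : List Char).contains c) l).reverse) '_' (by exact hcon)
  simp at hpc

theorem pvB_eq (res : String) :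
    PySem.Str.join "_" (((PySem.Chars.splitOn res.toList ['_']).map String.ofList).filter (fun t => !(t == ""))) =
      String.ofList (PySem.Chars.join ['_'] (pvWords res.toList)) := by
  rw [pvSplitOn_eq]
  rw [List.filter_map]
  have hfe : ((fun t => !(t == "")) ∘ String.ofList) = (fun x : List Char => !x.isEmpty) := by
    funext x
    cases x with
    | nil => simp
    | cons a b => simp [String.ext_iff]
  rw [hfe]
  unfold PySem.Str.join
  congr 1
  rw [List.map_map]
  have : (String.toList ∘ String.ofList) = id := by funext x; simp
  rw [this, List.map_id]
  rfl

theorem pvA_eq (res : String) :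
    String.ofList (((PySem.Str.stripChars res "_").toList.foldl
        (fun (st : Option Char × List Char) (c : Char) =>
          if c == '_' && st.1 == some c then st else (some c, st.2 ++ [c])) (none, [])).2)
      = String.ofList (PySem.Chars.join ['_'] (pvWords res.toList)) := by
  have hst : (PySem.Str.stripChars res "_").toList = PySem.Chars.stripChars res.toList ['_'] := by
    simp [PySem.Str.stripChars]
  rw [hst, pvFoldl_coll]
  have hb : ((none : Option Char) == some '_') = false := by simp
  rw [List.nil_append, hb]
  rw [pvColl_eq_join (PySem.Chars.stripChars res.toList ['_']).length _ le_rfl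
    (pvStrip_head res.toList) (pvStrip_last res.toList)]
  rw [pvStrip_words]

-- ===== VERDICT (by name: the statement is the Claim_ definition above) =====
theorem normalize_with_underscores_spec : Claim_equal_normalize_with_underscores := by
  intro s _
  show normalize_with_underscores s = normalize_with_underscores_alt s
  exact (pvA_eq (PySem.Str.replace (PySem.Str.replace s " " "_") "." "_")).trans
    (pvB_eq (PySem.Str.replace (PySem.Str.replace s " " "_") "." "_")).symm
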